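-- pv_equiv track=rewrite | github.com/apetrovskiy/testLeCo | src/main/java/problems/easy/GreatestCommonDivisorOfStrings/greatest_common_divisor_of_strings.py | is_divisor_of
-- ===== SOURCE A (Python) =====
-- def is_divisor_of(divisor: str, data: str) -> bool:
--     result: bool = False
--     if len(divisor) > len(data):
--         return result
--     if divisor == data:
--         return True
--     list_from_str2 = data.split(divisor)
--     result = all(x == '' for x in list_from_str2)
--     return result
-- ===== SOURCE B (Python) =====
-- def is_divisor_of(divisor: str, data: str) -> bool:
--     if len(divisor) > len(data):
--         return False
--     if divisor == data:
--         return True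
--     return divisor * (len(data) // len(divisor)) == data
--
--
-- if __name__ == "__main__":
--     print(is_divisor_of("ab", "ababab"), is_divisor_of("ab", "ababa"), is_divisor_of("", ""))
-- ===== Notes on version B (the rewrite author's own statement) =====
-- stated objective: idiomatic
-- what changed: Replaces the split-then-scan (build data.split(divisor) and check all pieces empty) with the classic closed-form check that divisor repeated len(data)//len(divisor) times reproduces data.
import Mathlib
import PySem

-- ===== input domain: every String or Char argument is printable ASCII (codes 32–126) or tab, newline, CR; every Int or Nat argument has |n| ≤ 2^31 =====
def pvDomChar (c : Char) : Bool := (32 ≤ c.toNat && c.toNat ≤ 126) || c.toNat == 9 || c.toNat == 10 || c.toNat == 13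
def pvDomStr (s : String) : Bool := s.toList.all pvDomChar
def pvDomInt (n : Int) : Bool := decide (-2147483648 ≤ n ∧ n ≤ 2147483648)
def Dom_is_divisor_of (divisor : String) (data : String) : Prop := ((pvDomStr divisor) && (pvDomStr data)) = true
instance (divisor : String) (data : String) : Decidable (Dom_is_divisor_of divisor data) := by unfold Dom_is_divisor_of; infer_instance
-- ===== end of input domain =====

-- B replaces A's split-then-scan with the closed-form check divisor * (len(data)//len(divisor)) == data.

-- ===== PORT A =====
def is_divisor_of (divisor : String) (data : String) : Bool :=
  if PySem.Str.len divisor > PySem.Str.len data then false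
  else if divisor == data then true
  else match PySem.Str.split? data divisor with
    | none => false   -- Python raises ValueError here (empty separator); excluded by Pre_
    | some l => l.all (fun x => x == "")

-- ===== PORT B =====
-- exact port of Python's str * int: int(q) copies, a non-positive q giving ""
def pyStrMul (cs : List Char) (q : Int) : List Char := (List.replicate q.toNat cs).flatten

def is_divisor_of_alt (divisor : String) (data : String) : Bool :=
  if PySem.Str.len divisor > PySem.Str.len data then false
  else if divisor == data then true
  else pyStrMul divisor.toList
        (PySem.Int.floordiv (PySem.Str.len data) (PySem.Str.len divisor)) == data.toList

-- ===== PRECONDITION & SPEC =====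
-- Pre_ excludes exactly the inputs where the Python A raises ValueError (empty divisor with
-- non-empty data); B raises ZeroDivisionError there.
def Pre_is_divisor_of (divisor : String) (data : String) : Prop := divisor = "" → data = ""
instance (divisor : String) (data : String) : Decidable (Pre_is_divisor_of divisor data) := by unfold Pre_is_divisor_of; infer_instance
def pvWitness_is_divisor_of : String × String := ("ab", "abab")

def Spec_is_divisor_of (divisor : String) (data : String) (out : Bool) : Prop := out = is_divisor_of_alt divisor data
instance (divisor : String) (data : String) (out : Bool) : Decidable (Spec_is_divisor_of divisor data out) := by unfold Spec_is_divisor_of; infer_instance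

-- ===== CLAIM (what is proved, stated in full; the proofs are below) =====
def Claim_equal_is_divisor_of : Prop := ∀ (divisor : String) (data : String), Dom_is_divisor_of divisor data → Pre_is_divisor_of divisor data → Spec_is_divisor_of divisor data (is_divisor_of divisor data)

-- ===== LEMMAS AND PROOFS =====

-- "l is a concatenation of copies of d", phrased the way A's split walks the string (fuel-based like splitOn.go)
def isRepGo (d : List Char) : Nat → List Char → Bool
  | 0, l => l.isEmpty
  | _ + 1, [] => true
  | fuel + 1, l => if d.isPrefixOf l then isRepGo d fuel (l.drop d.length) else false

-- A's split produces all-empty pieces exactly on repetitions of the separator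
lemma go_all (d : List Char) (hd : d ≠ []) :
    ∀ fuel l cur acc, l.length < fuel →
      ((PySem.Chars.splitOn.go d fuel l cur acc).all List.isEmpty)
        = (acc.all List.isEmpty && cur.isEmpty && isRepGo d fuel l) := by
  intro fuel
  induction fuel with
  | zero => omega
  | succ fuel ih =>
    intro l cur acc hf
    have hdpos : 0 < d.length := List.length_pos_iff.mpr hd
    match l with
    | [] =>
      simp [PySem.Chars.splitOn.go, isRepGo, List.all_reverse, Bool.and_comm]
    | c :: rest =>
      rw [show PySem.Chars.splitOn.go d (fuel+1) (c :: rest) cur acc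
            = if d.isPrefixOf (c :: rest) then PySem.Chars.splitOn.go d fuel ((c :: rest).drop d.length) [] (cur.reverse :: acc)
              else PySem.Chars.splitOn.go d fuel rest (c :: cur) acc from rfl]
      simp only [isRepGo]
      split
      · rw [ih _ _ _ (by rw [List.length_drop]; simp only [List.length_cons] at hf ⊢; omega)]
        simp [Bool.and_comm, Bool.and_assoc]
      · rw [ih _ _ _ (by simp only [List.length_cons] at hf; omega)]
        simp

-- B's closed form (d repeated |l|/|d| times equals l) is the same predicate
lemma rep_iff (d : List Char) (hd : d ≠ []) :
    ∀ fuel l, l.length < fuel →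
      (((List.replicate (l.length / d.length) d).flatten = l) ↔ isRepGo d fuel l = true) := by
  intro fuel
  induction fuel with
  | zero => omega
  | succ fuel ih =>
    intro l hf
    have hdpos : 0 < d.length := List.length_pos_iff.mpr hd
    match l with
    | [] => simp [isRepGo]
    | c :: rest =>
      simp only [isRepGo]
      split
      · rename_i hpre
        obtain ⟨u, hu⟩ := List.isPrefixOf_iff_prefix.mp hpre
        have hdrop : (c :: rest).drop d.length = u := by
          rw [← hu, List.drop_append_of_le_length (le_refl _)]
          simp
        have hlen : (c :: rest).length = d.length + u.length := by
          rw [← hu]; simp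
        rw [hlen, Nat.add_comm, Nat.add_div_right _ hdpos, hdrop]
        rw [← ih u (by simp only [List.length_cons] at hf hlen; omega)]
        constructor
        · intro h
          rw [List.replicate_succ, List.flatten_cons, ← hu] at h
          exact List.append_cancel_left h
        · intro h
          rw [List.replicate_succ, List.flatten_cons, h, hu]
      · rename_i hpre
        simp only [iff_false, Bool.false_eq_true, ne_eq]
        intro h
        by_cases hle : d.length ≤ (c :: rest).length
        · have hq : 0 < (c :: rest).length / d.length := Nat.div_pos hle hdpos
          obtain ⟨q, hq'⟩ : ∃ q, (c :: rest).length / d.length = q + 1 :=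
            ⟨_, (Nat.succ_pred_eq_of_pos hq).symm⟩
          rw [hq', List.replicate_succ, List.flatten_cons] at h
          exact hpre (List.isPrefixOf_iff_prefix.mpr ⟨_, h⟩)
        · have h0 : (c :: rest).length / d.length = 0 := Nat.div_eq_of_lt (by omega)
          rw [h0] at h
          simp at h

-- B's argument to str*int is the chunk count, as a Nat
lemma strMul_arg (divisor data : String) :
    pyStrMul divisor.toList (PySem.Int.floordiv (PySem.Str.len data) (PySem.Str.len divisor))
      = (List.replicate (data.toList.length / divisor.toList.length) divisor.toList).flatten := by
  have hlen : ∀ s : String, PySem.Str.len s = (s.toList.length : Int) := by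
    intro s; simp [PySem.Str.len, PySem.Chars.len]
  rw [hlen, hlen, PySem.Int.floordiv_natCast]
  simp only [pyStrMul]
  rw [Int.toNat_natCast]

-- ===== VERDICT (by name: the statement is the Claim_ definition above) =====
theorem is_divisor_of_spec : Claim_equal_is_divisor_of := by
  intro divisor data _ hpre
  unfold Spec_is_divisor_of is_divisor_of is_divisor_of_alt
  split
  · rfl
  · split
    · rfl
    · rename_i hle hne
      have hdne : divisor ≠ "" := by
        intro h; exact hne (by simp [h, hpre h])
      have hdl : divisor.toList ≠ [] := by
        intro h
        exact hdne (String.toList_inj.mp (by simpa using h))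
      have hsplit : PySem.Str.split? data divisor
          = some ((PySem.Chars.splitOn data.toList divisor.toList).map String.ofList) := by
        simp [PySem.Str.split?, PySem.Chars.split?, hdl]
      rw [hsplit]
      show ((PySem.Chars.splitOn data.toList divisor.toList).map String.ofList).all (fun x => x == "") = _
      rw [List.all_map]
      have h1 : ((fun x => x == "") ∘ String.ofList) = List.isEmpty := by
        funext cs
        simpa using (by rw [← String.ofList_nil, beq_eq_decide]; cases cs <;> simp :
          (String.ofList cs == "") = cs.isEmpty)
      rw [h1, PySem.Chars.splitOn,
          go_all _ hdl _ _ _ _ (Nat.lt_succ_self _), strMul_arg]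
      rw [Bool.eq_iff_iff]
      simp only [List.all_nil, List.isEmpty_nil, Bool.true_and, beq_iff_eq]
      exact (rep_iff _ hdl _ _ (Nat.lt_succ_self _)).symm
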